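-- pv_equiv track=rewrite | github.com/kant/MScThesis2020 | TripsSplice/tripsSplice.py | get_y_values
-- ===== SOURCE A (Python) =====
-- def get_y_values(positions_number):
--     # to produce a clear layout of the networkx plot ensure that nodes dont overlap.
--     # if overlap would occur based on the genomic coordinates (x axis) elevate the next
--     # node one point on the y axis
--
--     start_positions = []
--     end_positions = []
--     for i in positions_number:
--         start_positions.append(positions_number[i][0])
--         end_positions.append(positions_number[i][1])
--
--     min_position = min(start_positions)
--     max_position = max(end_positions)
--     number_x_y = {}
--     for i in range(min_position, max_position):
--         exons_in_range = 0
--         for exon in positions_number: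
--             if i in range(positions_number[exon][0]-100, positions_number[exon][1]+100):
--                 exons_in_range += 1
--                 if exon not in number_x_y:
--                     number_x_y[exon] = [positions_number[exon][0], exons_in_range]
--
--                 else:
--                     if number_x_y[exon][1] < exons_in_range:
--                         number_x_y[exon][1] = exons_in_range
--
--     return number_x_y
-- ===== SOURCE B (Python) =====
-- def get_y_values(positions_number):
--     # Event-compressed sweep: the covered-exon set only changes at the points
--     # start-100 / end+100, so it suffices to scan those points (plus the scan's
--     # own left edge) instead of every genomic coordinate.
--     spans = [(k, positions_number[k][0], positions_number[k][1]) for k in positions_number]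
--     lo = min(s for _, s, _ in spans)
--     hi = max(e for _, _, e in spans)
--     events = sorted({lo} | {s - 100 for _, s, _ in spans} | {e + 100 for _, _, e in spans})
--     points = [p for p in events if lo <= p < hi]
--     number_x_y = {}
--     for p in points:
--         covered = [(k, s) for k, s, e in spans if s - 100 <= p < e + 100]
--         for rank, (k, s) in enumerate(covered, 1):
--             v = number_x_y.setdefault(k, [s, rank])
--             if v[1] < rank:
--                 v[1] = rank
--     return number_x_y
-- ===== Notes on version B (the rewrite author's own statement) =====
-- stated objective: faster
-- what changed: Instead of scanning every integer coordinate in [min_start, max_end) and re-counting covering exons at each (O(span*N)), B coordinate-compresses: the covered set only changes at the event points start-100/end+100, so it sorts those events and runs one counting pass per event point (O(N^2 + N log N), independent of the genomic span).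
-- outside the precondition, e.g. on get_y_values({}): A raises ValueError, B raises ValueError; on get_y_values({'a': [1]}): A raises IndexError, B raises IndexError
import Mathlib
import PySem

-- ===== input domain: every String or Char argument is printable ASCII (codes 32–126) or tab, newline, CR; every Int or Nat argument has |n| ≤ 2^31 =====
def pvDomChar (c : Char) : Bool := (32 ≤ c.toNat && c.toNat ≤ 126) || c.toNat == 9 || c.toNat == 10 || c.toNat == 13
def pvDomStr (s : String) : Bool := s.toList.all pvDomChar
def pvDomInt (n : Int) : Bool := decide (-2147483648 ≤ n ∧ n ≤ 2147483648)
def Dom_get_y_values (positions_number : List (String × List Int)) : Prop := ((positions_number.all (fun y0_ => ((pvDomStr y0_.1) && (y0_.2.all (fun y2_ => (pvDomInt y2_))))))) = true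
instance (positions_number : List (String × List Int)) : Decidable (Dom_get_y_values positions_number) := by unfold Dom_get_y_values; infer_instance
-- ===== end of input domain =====

-- B replaces A's scan of every integer coordinate by a sweep over the sorted event
-- points start-100/end+100 (coordinate compression): same return value, faster.

-- ===== PORT A =====
-- positions_number[k] (dict lookup; Pre_ guarantees the key is present)
def pvLookup (positions_number : List (String × List Int)) (k : String) : List Int :=
  ((PySem.Dict.mk positions_number).get? k).getD []

-- body of A's inner 'for exon in positions_number' loop; state = (exons_in_range, number_x_y)
def pvA_inner (positions_number : List (String × List Int)) (i : Int)
    (st : Int × PySem.Dict String (List Int)) (exon : String) :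
    Int × PySem.Dict String (List Int) :=
  let v := pvLookup positions_number exon
  let s := (PySem.List.pyGet? v 0).getD 0
  let e := (PySem.List.pyGet? v 1).getD 0
  if s - 100 ≤ i ∧ i < e + 100 then
    let cnt := st.1 + 1
    let d := st.2
    if d.contains exon = false then
      (cnt, d.insert exon [s, cnt])
    else
      let cur := (d.get? exon).getD []
      if (PySem.List.pyGet? cur 1).getD 0 < cnt then (cnt, d.insert exon (cur.set 1 cnt))
      else (cnt, d)
  else st

-- one iteration of A's outer 'for i in range(min_position, max_position)' loop
def pvA_step (positions_number : List (String × List Int))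
    (d : PySem.Dict String (List Int)) (i : Int) : PySem.Dict String (List Int) :=
  ((positions_number.map Prod.fst).foldl (pvA_inner positions_number i) (0, d)).2

def get_y_values (positions_number : List (String × List Int)) : List (String × List Int) :=
  let keys := positions_number.map Prod.fst
  let se := keys.foldl (fun (acc : List Int × List Int) k =>
      (acc.1 ++ [(PySem.List.pyGet? (pvLookup positions_number k) 0).getD 0],
       acc.2 ++ [(PySem.List.pyGet? (pvLookup positions_number k) 1).getD 0])) ([], [])
  let min_position := (PySem.List.min? se.1 (fun x => x)).getD 0
  let max_position := (PySem.List.max? se.2 (fun x => x)).getD 0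
  ((PySem.List.pyRange min_position max_position 1).foldl
      (pvA_step positions_number) (PySem.Dict.mk [])).items

-- ===== PORT B =====
-- spans = [(k, positions_number[k][0], positions_number[k][1]) for k in positions_number]
def pvSpans (positions_number : List (String × List Int)) : List (String × Int × Int) :=
  positions_number.map (fun q =>
    (q.1, (PySem.List.pyGet? (pvLookup positions_number q.1) 0).getD 0,
          (PySem.List.pyGet? (pvLookup positions_number q.1) 1).getD 0))

-- body of B's 'for rank, (k, s) in enumerate(covered, 1)' update
def pvB_upd (d : PySem.Dict String (List Int)) (rank : Int) (ks : String × Int) :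
    PySem.Dict String (List Int) :=
  let d1 := d.setdefault ks.1 [ks.2, rank]
  let v := (d1.get? ks.1).getD []
  if (PySem.List.pyGet? v 1).getD 0 < rank then d1.insert ks.1 (v.set 1 rank) else d1

-- one iteration of B's 'for p in points' loop
def pvB_step (spans : List (String × Int × Int))
    (d : PySem.Dict String (List Int)) (p : Int) : PySem.Dict String (List Int) :=
  let covered := (spans.filter (fun t => decide (t.2.1 - 100 ≤ p ∧ p < t.2.2 + 100))).map
      (fun t => (t.1, t.2.1))
  (PySem.List.enumerate covered 1).foldl (fun d rk => pvB_upd d rk.1 rk.2) d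

def get_y_values_alt (positions_number : List (String × List Int)) : List (String × List Int) :=
  let spans := pvSpans positions_number
  let lo := (PySem.List.min? (spans.map (fun t => t.2.1)) (fun x => x)).getD 0
  let hi := (PySem.List.max? (spans.map (fun t => t.2.2)) (fun x => x)).getD 0
  let events := PySem.List.sorted
      (PySem.Set.union (PySem.Set.union (PySem.Set.ofList [lo])
        (spans.map (fun t => t.2.1 - 100))) (spans.map (fun t => t.2.2 + 100)))
      (fun x => x) false
  let points := events.filter (fun p => decide (lo ≤ p ∧ p < hi))
  ((points.foldl (pvB_step spans) (PySem.Dict.mk [])).items)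

-- ===== PRECONDITION & SPEC =====
-- Pre_ excludes inputs on which A raises (empty dict: min() of an empty sequence is a
-- ValueError; a value list of length < 2: IndexError), and duplicate keys in the
-- association-list encoding, which a Python dict cannot faithfully carry.
def Pre_get_y_values (positions_number : List (String × List Int)) : Prop :=
  positions_number ≠ [] ∧ (positions_number.map Prod.fst).Nodup ∧
    ∀ q ∈ positions_number, 2 ≤ q.2.length
instance (positions_number : List (String × List Int)) : Decidable (Pre_get_y_values positions_number) := by unfold Pre_get_y_values; infer_instance

def pvWitness_get_y_values : (List (String × List Int)) := [("a", [10, 20]), ("b", [15, 30])]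

def Spec_get_y_values (positions_number : List (String × List Int)) (out : List (String × List Int)) : Prop := out = get_y_values_alt positions_number
instance (positions_number : List (String × List Int)) (out : List (String × List Int)) : Decidable (Spec_get_y_values positions_number out) := by unfold Spec_get_y_values; infer_instance

-- ===== CLAIM (what is proved, stated in full; the proofs are below) =====
def Claim_equal_get_y_values : Prop := ∀ (positions_number : List (String × List Int)), Dom_get_y_values positions_number → Pre_get_y_values positions_number → Spec_get_y_values positions_number (get_y_values positions_number)

-- ===== LEMMAS AND PROOFS =====

-- canonical per-exon update (A's insert-or-raise-y and B's setdefault-then-raise-y both reduce to it)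
def pvU (d : PySem.Dict String (List Int)) (k : String) (s r : Int) :
    PySem.Dict String (List Int) :=
  if d.contains k = false then d.insert k [s, r]
  else if (PySem.List.pyGet? ((d.get? k).getD []) 1).getD 0 < r then
    d.insert k (((d.get? k).getD []).set 1 r)
  else d

-- processing the covered list from a given start rank
def pvStepC (l : List (String × Int)) (r0 : Int) (d : PySem.Dict String (List Int)) :
    PySem.Dict String (List Int) :=
  (PySem.List.enumerate l r0).foldl (fun d rk => pvU d rk.2.1 rk.2.2 rk.1) d

-- the exons covering coordinate p, with their starts
def pvCov (spans : List (String × Int × Int)) (p : Int) : List (String × Int) :=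
  (spans.filter (fun t => decide (t.2.1 - 100 ≤ p ∧ p < t.2.2 + 100))).map (fun t => (t.1, t.2.1))

-- the common shape of one outer iteration of either port
def pvStep (spans : List (String × Int × Int)) (d : PySem.Dict String (List Int)) (p : Int) :
    PySem.Dict String (List Int) :=
  pvStepC (pvCov spans p) 1 d

-- coordinates at which the covered set can change
def pvIsEvent (spans : List (String × Int × Int)) (y : Int) : Prop :=
  ∃ t ∈ spans, y = t.2.1 - 100 ∨ y = t.2.2 + 100

-- every stored value is a two-element list
def pvGood (d : PySem.Dict String (List Int)) : Prop :=
  ∀ k v, d.get? k = some v → ∃ a b : Int, v = [a, b]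

-- d already records, for each covered exon, a y-value at least its rank
def pvSat (d : PySem.Dict String (List Int)) (l : List (String × Int)) (r0 : Int) : Prop :=
  ∀ q ∈ PySem.List.enumerate l r0, ∃ v, d.get? q.2.1 = some v ∧
    q.1 ≤ (PySem.List.pyGet? v 1).getD 0

theorem pv_noop_fold (f : PySem.Dict String (List Int) → Int → PySem.Dict String (List Int))
    (xs : List Int) (d : PySem.Dict String (List Int)) (h : ∀ x ∈ xs, f d x = d) :
    xs.foldl f d = d := by
  induction xs with
  | nil => rfl
  | cons x xs ih =>
      simp only [List.foldl_cons, h x (by simp)]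
      exact ih (fun y hy => h y (by simp [hy]))

theorem pvB_upd_eq_pvU (d : PySem.Dict String (List Int)) (r : Int) (ks : String × Int) :
    pvB_upd d r ks = pvU d ks.1 ks.2 r := by
  unfold pvB_upd pvU
  by_cases h : d.contains ks.1 = true
  · simp only [PySem.Dict.setdefault_of_contains _ _ h, h, Bool.true_eq_false, reduceIte]
  · have h' : d.contains ks.1 = false := by simpa using h
    simp only [PySem.Dict.setdefault_of_not_contains _ _ h', h',
      PySem.Dict.get?_insert_self, Option.getD_some, reduceIte]
    have hg : (PySem.List.pyGet? [ks.2, r] 1).getD 0 = r := by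
      simp [PySem.List.pyGet?, PySem.List.pyIdx?]
    rw [hg]
    simp

theorem pv_good_U (d : PySem.Dict String (List Int)) (k : String) (s r : Int)
    (h : pvGood d) : pvGood (pvU d k s r) := by
  unfold pvU
  split_ifs with h1 h2
  · intro k' v hv
    rw [PySem.Dict.get?_insert] at hv
    split_ifs at hv with he
    · exact ⟨s, r, by simpa using hv.symm⟩
    · exact h k' v hv
  · intro k' v hv
    rw [PySem.Dict.get?_insert] at hv
    split_ifs at hv with he
    · -- value is cur.set 1 r where cur = (d.get? k).getD []
      have hc : (d.get? k).isSome := by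
        rw [← PySem.Dict.contains_eq_isSome_get?]
        simpa using h1
      obtain ⟨cur, hcur⟩ := Option.isSome_iff_exists.mp hc
      obtain ⟨a, b, hab⟩ := h k cur hcur
      refine ⟨a, r, ?_⟩
      have : v = cur.set 1 r := by simpa [hcur] using hv.symm
      simp [this, hab]
    · exact h k' v hv
  · exact h

theorem pv_good_stepC (l : List (String × Int)) (r0 : Int) (d : PySem.Dict String (List Int))
    (h : pvGood d) : pvGood (pvStepC l r0 d) := by
  induction l generalizing r0 d with
  | nil => simpa [pvStepC, PySem.List.enumerate_nil] using h
  | cons x xs ih =>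
      rw [pvStepC, PySem.List.enumerate_cons, List.foldl_cons]
      exact ih (r0 + 1) _ (pv_good_U _ _ _ _ h)

theorem pv_get?_stepC_not_mem (l : List (String × Int)) (r0 : Int)
    (d : PySem.Dict String (List Int)) (k : String) (hk : k ∉ l.map Prod.fst) :
    (pvStepC l r0 d).get? k = d.get? k := by
  induction l generalizing r0 d with
  | nil => simp [pvStepC, PySem.List.enumerate_nil]
  | cons x xs ih =>
      simp only [List.map_cons, List.mem_cons, not_or] at hk
      rw [pvStepC, PySem.List.enumerate_cons, List.foldl_cons]
      have h1 : (pvStepC xs (r0 + 1) (pvU d x.1 x.2 r0)).get? k = (pvU d x.1 x.2 r0).get? k :=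
        ih (r0 + 1) _ (by simpa using hk.2)
      rw [pvStepC] at h1
      rw [h1]
      unfold pvU
      split_ifs <;> simp [PySem.Dict.get?_insert, hk.1]

theorem pv_sat_noop (d : PySem.Dict String (List Int)) (l : List (String × Int)) (r0 : Int)
    (h : pvSat d l r0) : pvStepC l r0 d = d := by
  induction l generalizing r0 with
  | nil => simp [pvStepC, PySem.List.enumerate_nil]
  | cons x xs ih =>
      unfold pvSat at h
      rw [pvStepC, PySem.List.enumerate_cons, List.foldl_cons]
      obtain ⟨v, hv, hle⟩ := h (r0, x) (by simp [PySem.List.enumerate_cons])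
      have hU : pvU d x.1 x.2 r0 = d := by
        unfold pvU
        have hc : d.contains x.1 = true := by
          rw [PySem.Dict.contains_eq_isSome_get?, hv]; rfl
        rw [hc]
        simp only [Bool.true_eq_false, reduceIte, hv, Option.getD_some]
        rw [if_neg (by omega)]
      rw [hU]
      exact ih (r0 + 1) (fun q hq => h q (by simp [PySem.List.enumerate_cons, hq]))

theorem pv_sat_stepC (l : List (String × Int)) (r0 : Int) (d : PySem.Dict String (List Int))
    (hnd : (l.map Prod.fst).Nodup) (hg : pvGood d) : pvSat (pvStepC l r0 d) l r0 := by
  induction l generalizing r0 d with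
  | nil => intro q hq; simp [PySem.List.enumerate_nil] at hq
  | cons x xs ih =>
      simp only [List.map_cons, List.nodup_cons] at hnd
      intro q hq
      rw [PySem.List.enumerate_cons, List.mem_cons] at hq
      rw [pvStepC, PySem.List.enumerate_cons, List.foldl_cons]
      rcases hq with hq | hq
      · subst hq
        have hnm : (pvStepC xs (r0 + 1) (pvU d x.1 x.2 r0)).get? x.1
            = (pvU d x.1 x.2 r0).get? x.1 := pv_get?_stepC_not_mem _ _ _ _ hnd.1
        rw [pvStepC] at hnm
        rw [hnm]
        unfold pvU
        split_ifs with h1 h2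
        · exact ⟨[x.2, r0], by simp [PySem.Dict.get?_insert_self]⟩
        · have hc : (d.get? x.1).isSome := by
            rw [← PySem.Dict.contains_eq_isSome_get?]; simpa using h1
          obtain ⟨cur, hcur⟩ := Option.isSome_iff_exists.mp hc
          obtain ⟨a, b, hab⟩ := hg x.1 cur hcur
          refine ⟨[a, r0], ?_⟩
          rw [PySem.Dict.get?_insert_self, hcur]
          simp [hab]
        · have hc : (d.get? x.1).isSome := by
            rw [← PySem.Dict.contains_eq_isSome_get?]; simpa using h1
          obtain ⟨cur, hcur⟩ := Option.isSome_iff_exists.mp hc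
          exact ⟨cur, by rw [hcur], by simp only [hcur, Option.getD_some] at h2; omega⟩
      · exact ih (r0 + 1) (pvU d x.1 x.2 r0) hnd.2 (pv_good_U _ _ _ _ hg) q hq

theorem pv_cov_nodup (spans : List (String × Int × Int))
    (hnd : (spans.map Prod.fst).Nodup) (p : Int) : ((pvCov spans p).map Prod.fst).Nodup := by
  unfold pvCov
  rw [List.map_map]
  exact (List.filter_sublist.map _).nodup hnd

theorem pv_cov_congr (spans : List (String × Int × Int)) (a x : Int) (hax : a ≤ x)
    (hne : ∀ y, pvIsEvent spans y → ¬ (a < y ∧ y ≤ x)) :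
    pvCov spans x = pvCov spans a := by
  unfold pvCov
  congr 1
  apply List.filter_congr
  intro t ht
  have h1 := hne (t.2.1 - 100) ⟨t, ht, Or.inl rfl⟩
  have h2 := hne (t.2.2 + 100) ⟨t, ht, Or.inr rfl⟩
  simp only [decide_eq_decide]
  omega

theorem pv_block (spans : List (String × Int × Int))
    (hnd : (spans.map Prod.fst).Nodup) (a b : Int) (d : PySem.Dict String (List Int))
    (hg : pvGood d) (hab : a < b)
    (hev : ∀ y, pvIsEvent spans y → ¬ (a < y ∧ y < b)) :
    (PySem.List.pyRange a b 1).foldl (pvStep spans) d = pvStep spans d a := by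
  rw [PySem.List.pyRange_one_cons hab, List.foldl_cons]
  apply pv_noop_fold
  intro x hx
  rw [PySem.List.mem_pyRange_one] at hx
  have hcov : pvCov spans x = pvCov spans a := by
    apply pv_cov_congr spans a x (by omega)
    intro y hy ⟨hy1, hy2⟩
    exact hev y hy ⟨hy1, by omega⟩
  show pvStepC (pvCov spans x) 1 (pvStep spans d a) = pvStep spans d a
  rw [hcov]
  exact pv_sat_noop _ _ _ (pv_sat_stepC _ _ _ (pv_cov_nodup spans hnd a) hg)

theorem pv_sweep (spans : List (String × Int × Int))
    (hnd : (spans.map Prod.fst).Nodup) (hi : Int) :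
    ∀ (l : List Int) (a : Int) (d : PySem.Dict String (List Int)), pvGood d → a < hi →
      List.Pairwise (· < ·) (a :: l) → (∀ x ∈ l, x < hi) →
      (∀ y, pvIsEvent spans y → a < y → y < hi → y ∈ l) →
      (PySem.List.pyRange a hi 1).foldl (pvStep spans) d = (a :: l).foldl (pvStep spans) d := by
  intro l
  induction l with
  | nil =>
      intro a d hg hahi _ _ hev
      rw [List.foldl_cons, List.foldl_nil]
      exact pv_block spans hnd a hi d hg hahi
        (fun y hy ⟨h1, h2⟩ => by simpa using hev y hy h1 h2)
  | cons b rest ih =>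
      intro a d hg hahi hpw hlt hev
      obtain ⟨hhead, hpw'⟩ := List.pairwise_cons.mp hpw
      have hab : a < b := hhead b (by simp)
      have hbhi : b < hi := hlt b (by simp)
      rw [PySem.List.pyRange_one_append a b hi (by omega) (by omega), List.foldl_append]
      rw [pv_block spans hnd a b d hg hab (fun y hy ⟨h1, h2⟩ => by
        rcases List.mem_cons.mp (hev y hy h1 (by omega)) with h | h
        · omega
        · exact absurd ((List.pairwise_cons.mp hpw').1 y h) (by omega))]
      rw [List.foldl_cons]
      exact ih b (pvStep spans d a)
        (pv_good_stepC _ _ _ hg) hbhi hpw'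
        (fun x hx => hlt x (by simp [hx]))
        (fun y hy hby hyhi => by
          rcases List.mem_cons.mp (hev y hy (by omega) hyhi) with h | h
          · omega
          · exact h)

theorem pvB_step_eq (spans : List (String × Int × Int))
    (d : PySem.Dict String (List Int)) (p : Int) :
    pvB_step spans d p = pvStep spans d p := by
  unfold pvB_step pvStep pvStepC pvCov
  exact PySem.List.foldl_congr_mem _ _ _ _ (fun acc x _ => pvB_upd_eq_pvU acc x.1 x.2)

theorem pvA_inner_eq (positions_number : List (String × List Int)) (i : Int)
    (st : Int × PySem.Dict String (List Int)) (exon : String) :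
    pvA_inner positions_number i st exon =
      (if ((PySem.List.pyGet? (pvLookup positions_number exon) 0).getD 0) - 100 ≤ i ∧
          i < ((PySem.List.pyGet? (pvLookup positions_number exon) 1).getD 0) + 100 then
        (st.1 + 1, pvU st.2 exon ((PySem.List.pyGet? (pvLookup positions_number exon) 0).getD 0)
          (st.1 + 1))
      else st) := by
  unfold pvA_inner pvU
  dsimp only []
  split_ifs <;> rfl

theorem pv_bridge (i : Int) : ∀ (ts : List (String × Int × Int)) (c : Int)
    (d : PySem.Dict String (List Int)),
    (ts.foldl (fun st t => if t.2.1 - 100 ≤ i ∧ i < t.2.2 + 100 then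
        (st.1 + 1, pvU st.2 t.1 t.2.1 (st.1 + 1)) else st) (c, d)).2
      = (PySem.List.enumerate (pvCov ts i) (c + 1)).foldl
          (fun d rk => pvU d rk.2.1 rk.2.2 rk.1) d := by
  intro ts
  induction ts with
  | nil => intro c d; simp [pvCov, PySem.List.enumerate_nil]
  | cons t ts ih =>
      intro c d
      by_cases h : t.2.1 - 100 ≤ i ∧ i < t.2.2 + 100
      · have hc : pvCov (t :: ts) i = (t.1, t.2.1) :: pvCov ts i := by
          unfold pvCov
          rw [List.filter_cons, if_pos (by simpa using h), List.map_cons]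
        rw [List.foldl_cons, if_pos h, hc, PySem.List.enumerate_cons, List.foldl_cons]
        exact ih (c + 1) (pvU d t.1 t.2.1 (c + 1))
      · have hc : pvCov (t :: ts) i = pvCov ts i := by
          unfold pvCov
          rw [List.filter_cons, if_neg (by simpa using h)]
        rw [List.foldl_cons, if_neg h, hc]
        exact ih c d

theorem pvA_step_eq (positions_number : List (String × List Int))
    (d : PySem.Dict String (List Int)) (i : Int) :
    pvA_step positions_number d i = pvStep (pvSpans positions_number) d i := by
  unfold pvA_step
  have hkeys : positions_number.map Prod.fst = (pvSpans positions_number).map Prod.fst := by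
    simp [pvSpans, List.map_map]
  rw [hkeys, List.foldl_map]
  have hcong : ((pvSpans positions_number).foldl
      (fun st t => pvA_inner positions_number i st t.1) (0, d))
      = ((pvSpans positions_number).foldl (fun st t =>
          if t.2.1 - 100 ≤ i ∧ i < t.2.2 + 100 then
            (st.1 + 1, pvU st.2 t.1 t.2.1 (st.1 + 1)) else st) (0, d)) := by
    apply PySem.List.foldl_congr_mem
    intro acc t ht
    simp only [pvSpans, List.mem_map] at ht
    obtain ⟨q, _, rfl⟩ := ht
    rw [pvA_inner_eq]
  rw [hcong, pv_bridge i (pvSpans positions_number) 0 d]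
  norm_num [pvStep, pvStepC]

theorem pv_good_empty : pvGood (PySem.Dict.mk ([] : List (String × List Int))) := by
  intro k v h
  have : (PySem.Dict.mk ([] : List (String × List Int))) = PySem.Dict.empty := rfl
  rw [this, PySem.Dict.get?_empty] at h
  cases h

theorem pv_pairwise_lt (l : List Int) (hpw : l.Pairwise (· ≤ ·)) (hnd : l.Nodup) :
    l.Pairwise (· < ·) :=
  (hpw.and hnd).imp (fun h => lt_of_le_of_ne h.1 h.2)

theorem pv_main : ∀ (positions_number : List (String × List Int)),
    Pre_get_y_values positions_number →
    get_y_values positions_number = get_y_values_alt positions_number := by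
  intro pn hpre
  obtain ⟨-, hnd, -⟩ := hpre
  unfold get_y_values get_y_values_alt
  dsimp only []
  rw [PySem.List.foldl_prod_mk
    (f := fun acc k => acc ++ [(PySem.List.pyGet? (pvLookup pn k) 0).getD 0])
    (g := fun acc k => acc ++ [(PySem.List.pyGet? (pvLookup pn k) 1).getD 0])]
  rw [PySem.List.foldl_append_singleton_eq_map, PySem.List.foldl_append_singleton_eq_map,
    List.nil_append, List.nil_append]
  have hS : (pn.map Prod.fst).map (fun k => (PySem.List.pyGet? (pvLookup pn k) 0).getD 0)
      = (pvSpans pn).map (fun t => t.2.1) := by simp [pvSpans, List.map_map]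
  have hE : (pn.map Prod.fst).map (fun k => (PySem.List.pyGet? (pvLookup pn k) 1).getD 0)
      = (pvSpans pn).map (fun t => t.2.2) := by simp [pvSpans, List.map_map]
  rw [hS, hE]
  set spans := pvSpans pn with hspans
  set lo := (PySem.List.min? (spans.map fun t => t.2.1) fun x => x).getD 0 with hlo
  set hi := (PySem.List.max? (spans.map fun t => t.2.2) fun x => x).getD 0 with hhi
  have hndsp : (spans.map Prod.fst).Nodup := by
    simpa [hspans, pvSpans, List.map_map] using hnd
  have hstepA : pvA_step pn = pvStep spans := by
    funext d i; exact pvA_step_eq pn d i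
  have hstepB : pvB_step spans = pvStep spans := by
    funext d p; exact pvB_step_eq spans d p
  rw [hstepA, hstepB]
  congr 1
  -- the fold over every coordinate equals the fold over the filtered sorted event set
  set S := PySem.Set.union (PySem.Set.union (PySem.Set.ofList [lo])
      (spans.map fun t => t.2.1 - 100)) (spans.map fun t => t.2.2 + 100) with hSdef
  set events := PySem.List.sorted S (fun x => x) false with hev
  set points := events.filter (fun p => decide (lo ≤ p ∧ p < hi)) with hpts
  by_cases hlohi : lo < hi
  · have hndS : (S : List Int).Nodup :=
      PySem.Set.nodup_union _ _ (PySem.Set.nodup_union _ _ (PySem.Set.nodup_ofList _))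
    have hndev : events.Nodup := ((PySem.List.sorted_perm S (fun x => x) false).nodup_iff).mpr hndS
    have hpwev : events.Pairwise (· < ·) :=
      pv_pairwise_lt _ (PySem.List.sorted_pairwise S (fun x => x)) hndev
    have hpwpts : points.Pairwise (· < ·) := hpwev.sublist (List.filter_sublist)
    have hmemS : ∀ y : Int, y ∈ (S : List Int) ↔ y = lo ∨
        y ∈ spans.map (fun t => t.2.1 - 100) ∨ y ∈ spans.map (fun t => t.2.2 + 100) := by
      intro y
      rw [hSdef]
      rw [PySem.Set.mem_union, PySem.Set.mem_union, PySem.Set.mem_ofList]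
      simp [or_assoc]
    have hmempts : ∀ y : Int, y ∈ points ↔ y ∈ (S : List Int) ∧ (lo ≤ y ∧ y < hi) := by
      intro y
      rw [hpts, List.mem_filter, hev, PySem.List.mem_sorted]
      simp
    have hlopts : lo ∈ points := by
      rw [hmempts]
      exact ⟨(hmemS lo).mpr (Or.inl rfl), le_refl lo, hlohi⟩
    obtain ⟨tl, htl⟩ : ∃ tl, points = lo :: tl := by
      cases hp : points with
      | nil => rw [hp] at hlopts; cases hlopts
      | cons p t =>
          refine ⟨t, ?_⟩
          have hple : lo ≤ p := by
            have := (hmempts p).mp (by rw [hp]; simp)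
            exact this.2.1
          rcases (by rw [hp] at hlopts; simpa using hlopts : lo = p ∨ lo ∈ t) with h | h
          · rw [h]
          · have : p < lo := by
              rw [hp] at hpwpts
              exact (List.pairwise_cons.mp hpwpts).1 lo h
            omega
    rw [htl]
    apply pv_sweep spans hndsp hi tl lo _ pv_good_empty hlohi
    · rw [← htl]; exact hpwpts
    · intro x hx
      have : x ∈ points := by rw [htl]; simp [hx]
      exact ((hmempts x).mp this).2.2
    · intro y hy hloy hyhi
      obtain ⟨t, ht, hcase⟩ := hy
      have hyS : y ∈ (S : List Int) := by
        rw [hmemS]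
        rcases hcase with h | h
        · exact Or.inr (Or.inl (List.mem_map.mpr ⟨t, ht, h.symm⟩))
        · exact Or.inr (Or.inr (List.mem_map.mpr ⟨t, ht, h.symm⟩))
      have : y ∈ points := (hmempts y).mpr ⟨hyS, by omega, hyhi⟩
      rw [htl] at this
      rcases List.mem_cons.mp this with h | h
      · omega
      · exact h
  · have h1 : PySem.List.pyRange lo hi 1 = [] := PySem.List.pyRange_one_eq_nil (by omega)
    have h2 : points = [] := by
      rw [hpts]
      apply List.filter_eq_nil_iff.mpr
      intro x _
      simp only [decide_eq_true_eq]
      omega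
    rw [h1, h2]


-- ===== VERDICT (by name: the statement is the Claim_ definition above) =====
theorem get_y_values_spec : Claim_equal_get_y_values := by
  intro positions_number _ hpre
  unfold Spec_get_y_values
  exact pv_main positions_number hpre
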